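-- pv_equiv track=rewrite | github.com/yuzai1993/qlib | paper_trading/paper_trading.py | get_prev_trading_day
-- ===== SOURCE A (Python) =====
-- def get_prev_trading_day(date_str: str, calendar: list[str]) -> str:
--     idx = None
--     for i, d in enumerate(calendar):
--         if d == date_str:
--             idx = i
--             break
--     if idx is not None and idx > 0:
--         return calendar[idx - 1]
--     return None
-- ===== SOURCE B (Python) =====
-- def get_prev_trading_day(date_str: str, calendar: list[str]) -> str:
--     # Build a predecessor index in one pass (first occurrence wins), then one lookup.
--     prev_map = {}
--     prev = None
--     for d in calendar:
--         if d not in prev_map: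
--             prev_map[d] = prev
--         prev = d
--     return prev_map.get(date_str)
-- ===== Notes on version B (the rewrite author's own statement) =====
-- stated objective: alternative
-- what changed: A scans with enumerate for the first index of date_str and then indexes calendar; B builds a predecessor dictionary (first occurrence wins) in one pass and answers with a single lookup, removing the index arithmetic.
import Mathlib
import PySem

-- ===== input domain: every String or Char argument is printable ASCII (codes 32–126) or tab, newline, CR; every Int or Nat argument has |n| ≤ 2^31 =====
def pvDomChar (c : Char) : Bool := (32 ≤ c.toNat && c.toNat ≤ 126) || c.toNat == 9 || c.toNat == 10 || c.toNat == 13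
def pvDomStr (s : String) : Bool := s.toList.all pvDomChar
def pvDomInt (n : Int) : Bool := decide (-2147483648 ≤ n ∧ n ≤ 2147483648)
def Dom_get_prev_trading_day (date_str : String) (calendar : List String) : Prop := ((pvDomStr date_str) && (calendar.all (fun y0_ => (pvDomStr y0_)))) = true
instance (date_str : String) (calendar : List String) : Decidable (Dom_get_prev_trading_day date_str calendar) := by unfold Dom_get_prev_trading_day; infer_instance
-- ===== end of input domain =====

-- B replaces A's find-first-index-then-index-back scan by a one-pass predecessor
-- dictionary (first occurrence wins) followed by a single lookup; objective: alternative.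

-- ===== PORT A =====
-- 'for i, d in enumerate(calendar): if d == date_str: idx = i; break'
def pvFindIdx (date_str : String) : List String → Nat → Option Nat
  | [], _ => none
  | d :: rest, i => if d = date_str then some i else pvFindIdx date_str rest (i + 1)

def get_prev_trading_day (date_str : String) (calendar : List String) : Option String :=
  match pvFindIdx date_str calendar 0 with
  | some idx =>
      if idx > 0 then PySem.List.pyGet? calendar ((idx : Int) - 1)  -- always in range here
      else none
  | none => none

-- ===== PORT B =====
-- 'for d in calendar: if d not in prev_map: prev_map[d] = prev; prev = d'
def pvBuildPrevMap : List String → Option String → PySem.Dict String (Option String) →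
    PySem.Dict String (Option String)
  | [], _, m => m
  | d :: rest, prev, m =>
      pvBuildPrevMap rest (some d) (if m.contains d then m else m.insert d prev)

def get_prev_trading_day_alt (date_str : String) (calendar : List String) : Option String :=
  ((pvBuildPrevMap calendar none PySem.Dict.empty).get? date_str).getD none  -- prev_map.get(date_str)

-- ===== PRECONDITION & SPEC =====
def Spec_get_prev_trading_day (date_str : String) (calendar : List String) (out : Option String) : Prop := out = get_prev_trading_day_alt date_str calendar
instance (date_str : String) (calendar : List String) (out : Option String) : Decidable (Spec_get_prev_trading_day date_str calendar out) := by unfold Spec_get_prev_trading_day; infer_instance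

-- ===== CLAIM (what is proved, stated in full; the proofs are below) =====
def Claim_equal_get_prev_trading_day : Prop := ∀ (date_str : String) (calendar : List String), Dom_get_prev_trading_day date_str calendar → Spec_get_prev_trading_day date_str calendar (get_prev_trading_day date_str calendar)

-- ===== LEMMAS AND PROOFS =====

-- the common value: walking the list with the previous element in hand
def pvPrevOf (date_str : String) : List String → Option String → Option String
  | [], _ => none
  | d :: rest, prev => if d = date_str then prev else pvPrevOf date_str rest (some d)

-- first hit wrapped in 'some' (distinguishes "found with value none" from "not found")
def pvFindVal (date_str : String) : List String → Option String → Option (Option String)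
  | [], _ => none
  | d :: rest, prev => if d = date_str then some prev else pvFindVal date_str rest (some d)

theorem pvFindIdx_shift (s : String) (l : List String) (i : Nat) :
    pvFindIdx s l (i + 1) = (pvFindIdx s l i).map (· + 1) := by
  induction l generalizing i with
  | nil => rfl
  | cons d rest ih =>
      simp only [pvFindIdx]
      split_ifs with h
      · rfl
      · exact ih (i + 1)

theorem pvPrevOf_char (s : String) (l : List String) (prev : Option String) :
    pvPrevOf s l prev =
      (match pvFindIdx s l 0 with
       | none => none
       | some 0 => prev
       | some (j + 1) => l[j]?) := by
  induction l generalizing prev with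
  | nil => rfl
  | cons d rest ih =>
      simp only [pvPrevOf, pvFindIdx]
      split_ifs with h
      · rfl
      · rw [ih (some d), pvFindIdx_shift s rest 0]
        rcases hf : pvFindIdx s rest 0 with _ | j
        · rfl
        · cases j with
          | zero => simp
          | succ k => simp

theorem pvA_eq_prevOf (s : String) (l : List String) :
    get_prev_trading_day s l = pvPrevOf s l none := by
  unfold get_prev_trading_day
  rw [pvPrevOf_char s l none]
  rcases hf : pvFindIdx s l 0 with _ | j
  · rfl
  · cases j with
    | zero => rfl
    | succ k =>
        have h1 : ((k + 1 : Nat) : Int) - 1 = (k : Int) := by push_cast; ring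
        simp only [Nat.succ_eq_add_one, h1, PySem.List.pyGet?_natCast]
        simp

theorem pvBuild_get? (s : String) (l : List String) (prev : Option String)
    (m : PySem.Dict String (Option String)) :
    (pvBuildPrevMap l prev m).get? s = (m.get? s).or (pvFindVal s l prev) := by
  induction l generalizing prev m with
  | nil => simp [pvBuildPrevMap, pvFindVal]
  | cons d rest ih =>
      simp only [pvBuildPrevMap, pvFindVal]
      rw [ih]
      split_ifs with hc hd hd
      · -- d = s and already a key: the stored value wins on both sides
        subst hd
        have hs : (m.get? d).isSome := by
          rw [← PySem.Dict.contains_eq_isSome_get?]; exact hc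
        rcases hg : m.get? d with _ | v
        · rw [hg] at hs; simp at hs
        · simp
      · rfl
      · -- d = s and fresh: the inserted prev is the answer on both sides
        subst hd
        have hg : m.get? d = none := by
          rw [PySem.Dict.get?_eq_none_iff_contains]; simpa using hc
        simp [hg, PySem.Dict.get?_insert_self]
      · rw [PySem.Dict.get?_insert_of_ne m prev (Ne.symm hd)]

theorem pvFindVal_getD (s : String) (l : List String) (prev : Option String) :
    (pvFindVal s l prev).getD none = pvPrevOf s l prev := by
  induction l generalizing prev with
  | nil => rfl
  | cons d rest ih =>
      simp only [pvFindVal, pvPrevOf]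
      split_ifs with h
      · rfl
      · exact ih (some d)

theorem pvB_eq_prevOf (s : String) (l : List String) :
    get_prev_trading_day_alt s l = pvPrevOf s l none := by
  unfold get_prev_trading_day_alt
  rw [pvBuild_get?, PySem.Dict.get?_empty, Option.none_or, pvFindVal_getD]

-- ===== VERDICT (by name: the statement is the Claim_ definition above) =====
theorem get_prev_trading_day_spec : Claim_equal_get_prev_trading_day := by
  intro date_str calendar _
  unfold Spec_get_prev_trading_day
  rw [pvA_eq_prevOf, pvB_eq_prevOf]
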